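-- pv_equiv track=rewrite | github.com/d3d3t3t3/PythonPratice | code/fibonachicken_modify.py | fibonachicken
-- ===== SOURCE A (Python) =====
-- def make_fibonacci_set(n):
--     """
--     n보다 작거나 같을 때까지 [[0, 0], [1, 1], [2, 1], [3, 2], [5, 3] ...] 2차원 배열 생성
--     """
--     fibonacci_set = []
--     fibonacci_set.append([0, 0])
--     fibonacci_set.append([1, 1])
--     key = 1
--     value = 1
--     while key + value <= n:
--         key, value = key + value, key
--         key_value_set = [key, value]
--         fibonacci_set.append(key_value_set)
--     return fibonacci_set
--
-- class PeopleShouldnotNegative(Exception):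
--     """
--     사람의 수를 음수일 때 에러처리하는 클래스
--     """
--     def __init__(self):
--         pass
--
--     def __str__(self):
--         return "사람의 수가 음수일 수는 없습니다."
--
-- def fibonachicken(n):
--     if n < 0:
--         raise PeopleShouldnotNegative()
--     fibonacci_set = make_fibonacci_set(n)
--     index =len(fibonacci_set)-1 # fibonacci_set 배열의 마지막에서부터 탐색하기 위해 초기화
--     ret = 0
--     while n != 0:
--         if n >= fibonacci_set[index][0]:
--             n -= fibonacci_set[index][0]
--             ret += fibonacci_set[index][1]
--         index -= 1
--     return ret
-- ===== SOURCE B (Python) =====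
-- class PeopleShouldnotNegative(Exception):
--     """
--     사람의 수를 음수일 때 에러처리하는 클래스
--     """
--     def __init__(self):
--         pass
--
--     def __str__(self):
--         return "사람의 수가 음수일 수는 없습니다."
--
-- def _isqrt(x):
--     # integer floor square root by Newton's method (no math import)
--     if x < 2:
--         return x
--     r, y = x, (x + 1) // 2
--     while y < r:
--         r, y = y, (y + x // y) // 2
--     return r
--
-- def fibonachicken(n):
--     if n < 0:
--         raise PeopleShouldnotNegative()
--     # Closed form: the greedy Fibonacci pairing equals floor((n+1)/phi)
--     # = (isqrt(5*(n+1)^2) - (n+1)) // 2, since floor((n+1)*sqrt(5)) = isqrt(5*(n+1)^2).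
--     m = n + 1
--     return (_isqrt(5 * m * m) - m) // 2
-- ===== Notes on version B (the rewrite author's own statement) =====
-- stated objective: alternative
-- what changed: Replaces the greedy Fibonacci decomposition (build table, descend subtracting fibs) by a closed form: the answer equals floor((n+1)/phi), computed exactly as (isqrt(5*(n+1)^2)-(n+1))//2 with a Newton integer square root.
import Mathlib
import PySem

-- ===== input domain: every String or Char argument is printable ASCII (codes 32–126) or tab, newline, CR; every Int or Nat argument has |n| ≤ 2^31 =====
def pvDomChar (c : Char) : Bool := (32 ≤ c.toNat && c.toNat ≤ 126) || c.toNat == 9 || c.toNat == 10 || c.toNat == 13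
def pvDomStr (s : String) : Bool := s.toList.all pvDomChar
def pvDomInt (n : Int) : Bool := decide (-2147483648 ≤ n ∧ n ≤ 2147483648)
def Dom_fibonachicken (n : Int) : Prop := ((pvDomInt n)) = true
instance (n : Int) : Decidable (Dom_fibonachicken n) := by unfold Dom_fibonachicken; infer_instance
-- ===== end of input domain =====

-- B drops A's greedy Fibonacci decomposition entirely and returns the closed form
-- floor((n+1)/phi) = (isqrt(5*(n+1)^2) - (n+1)) // 2 with a Newton integer sqrt;
-- equivalence is proved for all n ≥ 0 (for n < 0 both Pythons raise, excluded by Pre_).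

-- ===== PORT A =====

-- while key + value <= n: append [key+value, key]; fuel n.toNat+1 is a totality
-- guard only (key strictly grows each iteration, so it is never exhausted).
def pvMkLoop : Nat → Int → Int → Int → List (Int × Int) → List (Int × Int)
  | 0, _, _, _, acc => acc
  | f + 1, n, key, value, acc =>
    if key + value ≤ n then
      pvMkLoop f n (key + value) key (acc ++ [(key + value, key)])
    else acc

def make_fibonacci_set (n : Int) : List (Int × Int) :=
  pvMkLoop (n.toNat + 1) n 1 1 [(0, 0), (1, 1)]

-- while n != 0: greedy subtract at index, index -= 1.  Recursion on the index;
-- the k = 0 fallthrough (Python would go on to index -1) is unreachable for n ≥ 0.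
def pvDescend (L : List (Int × Int)) : Nat → Int → Int → Int
  | k, n, ret =>
    if n = 0 then ret
    else
      let p := L.getD k (0, 0)
      let n' := if n ≥ p.1 then n - p.1 else n
      let ret' := if n ≥ p.1 then ret + p.2 else ret
      match k with
      | 0 => ret'
      | k' + 1 => pvDescend L k' n' ret'

def fibonachicken (n : Int) : Int :=
  if n < 0 then 0   -- Python raises PeopleShouldnotNegative here; excluded by Pre_
  else
    let L := make_fibonacci_set n
    pvDescend L (L.length - 1) n 0

-- ===== PORT B =====

-- while y < r: r, y = y, (y + x // y) // 2   (Newton's method; fuel is a totality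
-- guard only: r strictly decreases each iteration and stays ≥ 0).
def pvIsqrtLoop : Nat → Int → Int → Int → Int
  | 0, _, r, _ => r
  | f + 1, x, r, y =>
    if y < r then
      pvIsqrtLoop f x y (PySem.Int.floordiv (y + PySem.Int.floordiv x y) 2)
    else r

def pvIsqrt (x : Int) : Int :=
  if x < 2 then x
  else pvIsqrtLoop (x.toNat + 1) x x (PySem.Int.floordiv (x + 1) 2)

def fibonachicken_alt (n : Int) : Int :=
  if n < 0 then 0   -- Python raises PeopleShouldnotNegative here; excluded by Pre_
  else
    let m := n + 1
    PySem.Int.floordiv (pvIsqrt (5 * m * m) - m) 2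

-- ===== PRECONDITION & SPEC =====
-- Pre_ excludes exactly n < 0, where both A and B raise PeopleShouldnotNegative.
def Pre_fibonachicken (n : Int) : Prop := 0 ≤ n
instance (n : Int) : Decidable (Pre_fibonachicken n) := by unfold Pre_fibonachicken; infer_instance
def pvWitness_fibonachicken : Int := 7

def Spec_fibonachicken (n : Int) (out : Int) : Prop := out = fibonachicken_alt n
instance (n : Int) (out : Int) : Decidable (Spec_fibonachicken n out) := by unfold Spec_fibonachicken; infer_instance

-- ===== CLAIM (what is proved, stated in full; the proofs are below) =====
def Claim_equal_fibonachicken : Prop := ∀ (n : Int), Dom_fibonachicken n → Pre_fibonachicken n → Spec_fibonachicken n (fibonachicken n)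

-- ===== LEMMAS AND PROOFS =====

def pvP : Nat → Int × Int
  | 0 => (1, 1)
  | j + 1 => ((pvP j).1 + (pvP j).2, (pvP j).1)

lemma pvP_succ (j : Nat) : pvP (j + 1) = ((pvP j).1 + (pvP j).2, (pvP j).1) := rfl
lemma pvP1_succ (j : Nat) : (pvP (j + 1)).1 = (pvP j).1 + (pvP j).2 := rfl
lemma pvP2_succ (j : Nat) : (pvP (j + 1)).2 = (pvP j).1 := rfl

lemma pvP_pos (j : Nat) : 1 ≤ (pvP j).2 ∧ (pvP j).2 ≤ (pvP j).1 := by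
  induction j with
  | zero => simp [pvP]
  | succ j ih => simp [pvP_succ]; omega

lemma pvP_ge (j : Nat) : (j : Int) + 1 ≤ (pvP j).1 := by
  induction j with
  | zero => simp [pvP]
  | succ j ih => have := pvP_pos j; simp only [pvP_succ]; push_cast; omega

lemma pvP_lucas (j : Nat) :
    (2 * (pvP j).2 + (pvP j).1) * (2 * (pvP j).2 + (pvP j).1) - 5 * ((pvP j).1 * (pvP j).1) = 4 ∨
    (2 * (pvP j).2 + (pvP j).1) * (2 * (pvP j).2 + (pvP j).1) - 5 * ((pvP j).1 * (pvP j).1) = -4 := by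
  induction j with
  | zero => left; simp [pvP]
  | succ j ih =>
    rcases ih with h | h
    · right; simp only [pvP1_succ, pvP2_succ]; nlinarith [h]
    · left; simp only [pvP1_succ, pvP2_succ]; nlinarith [h]

def pvDown : Nat → Int → Int → Int → Int → Int
  | fuel, n, a, b, ret =>
    if n = 0 then ret
    else
      match fuel with
      | 0 => ret
      | f + 1 =>
        let n' := if n ≥ a then n - a else n
        let ret' := if n ≥ a then ret + b else ret
        pvDown f n' b (a - b) ret'


-- The list tail A builds, as a function (mirrors pvMkLoop but without the accumulator).
def pvChain : Nat → Int → Int → Int → List (Int × Int)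
  | 0, _, _, _ => []
  | f + 1, n, a, b => if a + b ≤ n then (a + b, a) :: pvChain f n (a + b) a else []

lemma mk_chain (fuel : Nat) : ∀ (n a b : Int) (acc : List (Int × Int)),
    pvMkLoop fuel n a b acc = acc ++ pvChain fuel n a b := by
  induction fuel with
  | zero => intro n a b acc; simp [pvMkLoop, pvChain]
  | succ f ih =>
    intro n a b acc
    simp only [pvMkLoop, pvChain]
    split
    · rw [ih]; simp
    · simp

-- One induction describing the chain in terms of pvP.
lemma main_chain (fuel : Nat) : ∀ (j : Nat) (n : Int),
    ∃ ℓ : Nat,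
      pvChain fuel n (pvP j).1 (pvP j).2 = (List.range ℓ).map (fun i => pvP (j + 1 + i)) ∧
      (∀ i < ℓ, (pvP (j + 1 + i)).1 ≤ n) ∧
      ((n - (pvP j).1).toNat < fuel → n < (pvP (j + ℓ)).1 + (pvP (j + ℓ)).2) := by
  induction fuel with
  | zero =>
    intro j n
    exact ⟨0, by simp [pvChain], by omega, by omega⟩
  | succ f ih =>
    intro j n
    by_cases h : (pvP j).1 + (pvP j).2 ≤ n
    · obtain ⟨ℓ, hc, hle, hstop⟩ := ih (j + 1) n
      refine ⟨ℓ + 1, ?_, ?_, ?_⟩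
      · have he : pvChain (f + 1) n (pvP j).1 (pvP j).2
            = ((pvP j).1 + (pvP j).2, (pvP j).1) :: pvChain f n (pvP (j+1)).1 (pvP (j+1)).2 := by
          simp [pvChain, h, pvP1_succ, pvP2_succ]
        rw [he, hc, List.range_succ_eq_map]
        simp only [List.map_cons, List.map_map]
        congr 1
        apply List.map_congr_left
        intro i _
        simp only [Function.comp]
        congr 1
        omega
      · intro i hi
        cases i with
        | zero => simpa [pvP1_succ] using h
        | succ i =>
          have hx := hle i (by omega)
          have he : j + 1 + (i + 1) = j + 1 + 1 + i := by omega
          rw [he]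
          exact hx
      · intro hf
        have h1 := pvP_pos j
        have h2 : (n - (pvP (j + 1)).1).toNat < f := by
          rw [pvP1_succ]; omega
        have hx := hstop h2
        have he : j + (ℓ + 1) = j + 1 + ℓ := by omega
        rw [he]
        exact hx
    · exact ⟨0, by simp [pvChain, h], by omega, by simp; omega⟩

-- A's descent over the table equals the two-variable descent, by induction on the index.
lemma descend_eq : ∀ (j : Nat) (fuel : Nat) (L : List (Int × Int)) (n ret : Int),
    (∀ i ≤ j, L.getD (i + 1) (0, 0) = pvP i) →
    0 ≤ n → n < (pvP j).1 + (pvP j).2 → j < fuel →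
    pvDescend L (j + 1) n ret = pvDown fuel n (pvP j).1 (pvP j).2 ret := by
  intro j
  induction j with
  | zero =>
    intro fuel L n ret hL hn hlt hfuel
    obtain ⟨f, rfl⟩ : ∃ f, fuel = f + 1 := ⟨fuel - 1, by omega⟩
    have h1 : L.getD 1 (0, 0) = pvP 0 := hL 0 (le_refl _)
    simp only [pvP] at hlt
    by_cases h0 : n = 0
    · subst h0
      rw [pvDescend, pvDown.eq_def]; simp
    · have hn1 : n = 1 := by omega
      subst hn1
      rw [pvDescend, pvDown.eq_def]
      simp only [h1]
      norm_num [pvP]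
      rw [pvDescend, pvDown.eq_def]
      norm_num
  | succ j ih =>
    intro fuel L n ret hL hn hlt hfuel
    obtain ⟨f, rfl⟩ : ∃ f, fuel = f + 1 := ⟨fuel - 1, by omega⟩
    by_cases h0 : n = 0
    · subst h0; rw [pvDescend, pvDown.eq_def]; simp
    · have hLj : L.getD (j + 1 + 1) (0, 0) = pvP (j + 1) := hL (j + 1) (le_refl _)
      have hpos := pvP_pos j
      have hdown : pvDown (f + 1) n (pvP (j + 1)).1 (pvP (j + 1)).2 ret
          = pvDown f (if n ≥ (pvP (j+1)).1 then n - (pvP (j+1)).1 else n)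
              (pvP (j+1)).2 ((pvP (j+1)).1 - (pvP (j+1)).2)
              (if n ≥ (pvP (j+1)).1 then ret + (pvP (j+1)).2 else ret) := by
        rw [pvDown.eq_def]; simp [h0]
      have hstep1 : (pvP (j+1)).2 = (pvP j).1 := pvP2_succ j
      have hstep2 : (pvP (j+1)).1 - (pvP (j+1)).2 = (pvP j).2 := by
        rw [pvP1_succ, pvP2_succ]; omega
      rw [hdown, hstep2, hstep1]
      rw [pvDescend]
      simp only [h0, hLj]
      have hA : pvDescend L (j + 1)
            (if n ≥ (pvP (j+1)).1 then n - (pvP (j+1)).1 else n)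
            (if n ≥ (pvP (j+1)).1 then ret + (pvP (j+1)).2 else ret)
          = pvDown f (if n ≥ (pvP (j+1)).1 then n - (pvP (j+1)).1 else n) (pvP j).1 (pvP j).2
            (if n ≥ (pvP (j+1)).1 then ret + (pvP (j+1)).2 else ret) := by
        apply ih
        · intro i hi; exact hL i (by omega)
        · split <;> omega
        · rw [pvP1_succ] at hlt ⊢; split <;> omega
        · omega
      simp only [ge_iff_le] at hA ⊢
      split <;> simp_all

lemma le_of_sq_le' (a b : Int) (hb : 0 ≤ b) (h : a * a ≤ b * b) : a ≤ b := by
  nlinarith [sq_nonneg (a - b), sq_nonneg (a + b)]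

lemma arith1p (a b m' t : Int) (hb1 : 1 ≤ b) (hba : b ≤ a) (hm'1 : 1 ≤ m') (hm'b : m' ≤ b)
    (_ht1 : 1 ≤ t) (hA : t*t ≤ 5*(m'*m') - 4)
    (hE : (2*b+a)*(2*b+a) - 5*(a*a) = 4) :
    (t + (2*b+a)) * (t + (2*b+a)) + 4 ≤ 5 * ((m'+a)*(m'+a)) := by
  have hB : (2*b+a)*(2*b+a) = 5*(a*a) + 4 := by omega
  have h1 : b*b + b*a - a*a = 1 := by nlinarith [hE]
  have hM : m'*m' + m'*a ≤ b*b + b*a := by nlinarith [hm'b, hm'1, hba, hb1]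
  have hrhs : 0 ≤ 10*m'*a - 4 := by nlinarith [mul_pos (by omega : (0:Int) < m') (by omega : (0:Int) < a)]
  have hmul : t*t*(5*(a*a)+4) ≤ (5*(m'*m')-4)*(5*(a*a)+4) := by
    apply mul_le_mul_of_nonneg_right hA; nlinarith [mul_self_nonneg a]
  have hq : (2*t*(2*b+a)) * (2*t*(2*b+a)) ≤ (10*m'*a - 4) * (10*m'*a - 4) := by
    nlinarith [hmul, hM, h1, hB]
  have htL : 2*t*(2*b+a) ≤ 10*m'*a - 4 := le_of_sq_le' _ _ hrhs hq
  nlinarith [hA, hB, htL]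

lemma arith1m (a b m' t : Int) (hb1 : 1 ≤ b) (hba : b ≤ a) (hm'1 : 1 ≤ m')
    (_ht1 : 1 ≤ t) (hA : t*t ≤ 5*(m'*m') - 4)
    (hE : (2*b+a)*(2*b+a) - 5*(a*a) = -4) :
    (t + (2*b+a)) * (t + (2*b+a)) + 4 ≤ 5 * ((m'+a)*(m'+a)) := by
  have hB : (2*b+a)*(2*b+a) = 5*(a*a) - 4 := by omega
  have hrhs : 0 ≤ 10*m'*a + 4 := by nlinarith [mul_pos (by omega : (0:Int) < m') (by omega : (0:Int) < a)]
  have hpos : (0:Int) ≤ 5*(a*a) - 4 := by nlinarith [hb1, hba]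
  have hmul : t*t*(5*(a*a)-4) ≤ (5*(m'*m')-4)*(5*(a*a)-4) := mul_le_mul_of_nonneg_right hA hpos
  have hq : (2*t*(2*b+a)) * (2*t*(2*b+a)) ≤ (10*m'*a + 4) * (10*m'*a + 4) := by
    nlinarith [hmul, hB, mul_pos (by omega : (0:Int) < m') (by omega : (0:Int) < a), sq_nonneg (m' - a), sq_nonneg (m' + a)]
  have htL : 2*t*(2*b+a) ≤ 10*m'*a + 4 := le_of_sq_le' _ _ hrhs hq
  nlinarith [hA, hB, htL]

lemma arith2p (a b m' t : Int) (hb1 : 1 ≤ b) (hba : b ≤ a) (hm'1 : 1 ≤ m')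
    (_ht1 : 1 ≤ t) (hu : 5*(m'*m') + 4 ≤ (t+2)*(t+2))
    (hE : (2*b+a)*(2*b+a) - 5*(a*a) = 4) :
    5 * ((m'+a)*(m'+a)) + 4 ≤ (t + (2*b+a) + 2) * (t + (2*b+a) + 2) := by
  have hB : (2*b+a)*(2*b+a) = 5*(a*a) + 4 := by omega
  have hlhs : (0:Int) ≤ 2*(t+2)*(2*b+a) := by nlinarith []
  have hmul : (5*(m'*m')+4)*(5*(a*a)+4) ≤ (t+2)*(t+2)*(5*(a*a)+4) := by
    apply mul_le_mul_of_nonneg_right hu; nlinarith [mul_self_nonneg a]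
  have hq : (10*m'*a - 4) * (10*m'*a - 4) ≤ (2*(t+2)*(2*b+a)) * (2*(t+2)*(2*b+a)) := by
    nlinarith [hmul, hB, mul_pos (by omega : (0:Int) < m') (by omega : (0:Int) < a), sq_nonneg (m' - a)]
  have htL : 10*m'*a - 4 ≤ 2*(t+2)*(2*b+a) := le_of_sq_le' _ _ hlhs hq
  nlinarith [hu, hB, htL]

lemma arith2m (a b m' t : Int) (hb1 : 1 ≤ b) (hba : b ≤ a) (hm'1 : 1 ≤ m') (hm'b : m' ≤ b)
    (ht1 : 1 ≤ t) (hu : 5*(m'*m') + 4 ≤ (t+2)*(t+2))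
    (hE : (2*b+a)*(2*b+a) - 5*(a*a) = -4) :
    5 * ((m'+a)*(m'+a)) + 4 ≤ (t + (2*b+a) + 2) * (t + (2*b+a) + 2) := by
  have hB : (2*b+a)*(2*b+a) = 5*(a*a) - 4 := by omega
  have h1 : b*b + b*a - a*a = -1 := by nlinarith [hE]
  have hM : m'*m' + m'*a ≤ b*b + b*a := by nlinarith [hm'b, hm'1, hba, hb1]
  have hlhs : (0:Int) ≤ 2*(t+2)*(2*b+a) := by nlinarith []
  have hpos : (0:Int) ≤ 5*(a*a) - 4 := by nlinarith [hb1, hba]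
  have hmul : (5*(m'*m')+4)*(5*(a*a)-4) ≤ (t+2)*(t+2)*(5*(a*a)-4) := mul_le_mul_of_nonneg_right hu hpos
  have hq : (10*m'*a + 4) * (10*m'*a + 4) ≤ (2*(t+2)*(2*b+a)) * (2*(t+2)*(2*b+a)) := by
    nlinarith [hmul, hB, hM, h1]
  have htL : 10*m'*a + 4 ≤ 2*(t+2)*(2*b+a) := le_of_sq_le' _ _ hlhs hq
  nlinarith [hu, hB, htL]

set_option maxHeartbeats 1000000 in
lemma down_bounds : ∀ (j : Nat) (fuel : Nat) (n ret : Int),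
    0 ≤ n → n < (pvP j).1 + (pvP j).2 → j < fuel →
    ∃ r : Int, pvDown fuel n (pvP j).1 (pvP j).2 ret = ret + r ∧ 0 ≤ r ∧
      (2*r + n + 1) * (2*r + n + 1) + 4 ≤ 5 * ((n+1) * (n+1)) ∧
      5 * ((n+1) * (n+1)) + 4 ≤ (2*r + n + 3) * (2*r + n + 3) := by
  intro j
  induction j with
  | zero =>
    intro fuel n ret hn hlt hf
    obtain ⟨f, rfl⟩ : ∃ f, fuel = f + 1 := ⟨fuel - 1, by omega⟩
    simp only [pvP] at hlt ⊢
    by_cases h0 : n = 0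
    · subst h0
      refine ⟨0, ?_, by norm_num⟩
      rw [pvDown.eq_def]; simp
    · have hn1 : n = 1 := by omega
      subst hn1
      refine ⟨1, ?_, by norm_num⟩
      rw [pvDown.eq_def]
      norm_num
      rw [pvDown.eq_def]
      norm_num
  | succ j ih =>
    intro fuel n ret hn hlt hf
    obtain ⟨f, rfl⟩ : ∃ f, fuel = f + 1 := ⟨fuel - 1, by omega⟩
    by_cases h0 : n = 0
    · subst h0
      refine ⟨0, ?_, by norm_num⟩
      rw [pvDown.eq_def]; simp
    · have hab := pvP_pos (j + 1)
      have hab' := pvP_pos j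
      have hb1 : (pvP (j+1)).2 = (pvP j).1 := pvP2_succ j
      have hab2 : (pvP (j+1)).1 - (pvP (j+1)).2 = (pvP j).2 := by
        rw [pvP1_succ, pvP2_succ]; ring
      have hstep : pvDown (f + 1) n (pvP (j+1)).1 (pvP (j+1)).2 ret
          = pvDown f (if n ≥ (pvP (j+1)).1 then n - (pvP (j+1)).1 else n)
              (pvP (j+1)).2 ((pvP (j+1)).1 - (pvP (j+1)).2)
              (if n ≥ (pvP (j+1)).1 then ret + (pvP (j+1)).2 else ret) := by
        rw [pvDown.eq_def]; simp [h0]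
      have haj : (pvP (j+1)).1 = (pvP j).1 + (pvP j).2 := pvP1_succ j
      by_cases hge : n ≥ (pvP (j+1)).1
      · -- subtract branch
        have hinv : n - (pvP (j+1)).1 < (pvP j).1 + (pvP j).2 := by omega
        obtain ⟨r', heq, hr0, hQ1, hQ2⟩ :=
          ih f (n - (pvP (j+1)).1) (ret + (pvP (j+1)).2) (by omega) hinv (by omega)
        rw [← hab2, ← hb1] at heq
        simp only [hge, if_pos] at hstep
        refine ⟨(pvP (j+1)).2 + r', by rw [hstep, heq]; ring, by omega, ?_, ?_⟩
        · have key1p := arith1p (pvP (j+1)).1 (pvP (j+1)).2 (n - (pvP (j+1)).1 + 1)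
            (2*r' + (n - (pvP (j+1)).1 + 1)) hab.1 hab.2 (by omega) (by omega) (by omega)
          have key1m := arith1m (pvP (j+1)).1 (pvP (j+1)).2 (n - (pvP (j+1)).1 + 1)
            (2*r' + (n - (pvP (j+1)).1 + 1)) hab.1 hab.2 (by omega) (by omega)
          rcases pvP_lucas (j + 1) with hE | hE
          · have := key1p (by nlinarith [hQ1]) hE
            nlinarith [this]
          · have := key1m (by nlinarith [hQ1]) hE
            nlinarith [this]
        · have key2p := arith2p (pvP (j+1)).1 (pvP (j+1)).2 (n - (pvP (j+1)).1 + 1)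
            (2*r' + (n - (pvP (j+1)).1 + 1)) hab.1 hab.2 (by omega) (by omega)
          have key2m := arith2m (pvP (j+1)).1 (pvP (j+1)).2 (n - (pvP (j+1)).1 + 1)
            (2*r' + (n - (pvP (j+1)).1 + 1)) hab.1 hab.2 (by omega) (by omega) (by omega)
          rcases pvP_lucas (j + 1) with hE | hE
          · have := key2p (by nlinarith [hQ2]) hE
            nlinarith [this]
          · have := key2m (by nlinarith [hQ2]) hE
            nlinarith [this]
      · -- no-subtract branch
        have hinv : n < (pvP j).1 + (pvP j).2 := by omega
        obtain ⟨r', heq, hr0, hQ1, hQ2⟩ := ih f n ret hn hinv (by omega)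
        rw [← hab2, ← hb1] at heq
        simp only [hge, if_false] at hstep
        exact ⟨r', by rw [hstep, heq], hr0, hQ1, hQ2⟩

lemma isqrt_loop_spec : ∀ (f : Nat) (x r : Int), 1 ≤ x →
    ((Nat.sqrt x.toNat : Int)) ≤ r → (r - (Nat.sqrt x.toNat : Int)).toNat < f →
    pvIsqrtLoop f x r (PySem.Int.floordiv (r + PySem.Int.floordiv x r) 2) = (Nat.sqrt x.toNat : Int) := by
  intro f
  induction f with
  | zero => intro x r _ _ h; omega
  | succ f ih =>
    intro x r hx hrs hf
    have hs1 : (Nat.sqrt x.toNat : Int) * (Nat.sqrt x.toNat : Int) ≤ x := by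
      have h := Nat.sqrt_le' x.toNat
      rw [pow_two] at h
      have h' : ((Nat.sqrt x.toNat * Nat.sqrt x.toNat : Nat) : Int) ≤ (x.toNat : Int) := by exact_mod_cast h
      push_cast at h'
      omega
    have hs_pos : (1 : Int) ≤ (Nat.sqrt x.toNat : Int) := by
      have : 0 < Nat.sqrt x.toNat := Nat.sqrt_pos.mpr (by omega)
      exact_mod_cast this
    have hr1 : 1 ≤ r := le_trans hs_pos hrs
    set s : Int := (Nat.sqrt x.toNat : Int) with hs_def
    have hd : 2 * s - r ≤ PySem.Int.floordiv x r := by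
      rw [PySem.Int.le_floordiv_iff_mul_le (by omega)]
      nlinarith [sq_nonneg (r - s)]
    have hy : s ≤ PySem.Int.floordiv (r + PySem.Int.floordiv x r) 2 := by
      rw [PySem.Int.le_floordiv_iff_mul_le (by omega)]
      omega
    rw [pvIsqrtLoop]
    split
    · rename_i hlt
      exact ih x _ hx hy (by omega)
    · rename_i hge
      have h1 : r * 2 ≤ r + PySem.Int.floordiv x r := by
        have := PySem.Int.le_floordiv_iff_mul_le (a := r + PySem.Int.floordiv x r) (b := 2) (q := r) (by omega)
        omega
      have h2 : r * r ≤ x := by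
        have := (PySem.Int.le_floordiv_iff_mul_le (a := x) (b := r) (q := r) (by omega)).mp (by omega)
        linarith
      have h3 : r ≤ s := by
        have hr' : ((r.toNat : Int)) = r := by omega
        have hx' : ((x.toNat : Int)) = x := by omega
        have hn : r.toNat * r.toNat ≤ x.toNat := by
          have : ((r.toNat * r.toNat : Nat) : Int) ≤ ((x.toNat : Nat) : Int) := by
            push_cast
            rw [hr', hx']
            exact h2
          exact_mod_cast this
        have := Nat.le_sqrt.mpr hn
        omega
      omega

lemma pvIsqrt_spec (x : Int) (hx : 0 ≤ x) :
    0 ≤ pvIsqrt x ∧ pvIsqrt x * pvIsqrt x ≤ x ∧ x < (pvIsqrt x + 1) * (pvIsqrt x + 1) := by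
  by_cases h2 : x < 2
  · have : x = 0 ∨ x = 1 := by omega
    rcases this with rfl | rfl <;> norm_num [pvIsqrt]
  · have hx1 : 1 ≤ x := by omega
    have hfx : PySem.Int.floordiv x x = 1 := by
      rw [PySem.Int.floordiv_eq_iff_of_pos (by omega)]
      omega
    have heq : pvIsqrt x = pvIsqrtLoop (x.toNat + 1) x x (PySem.Int.floordiv (x + PySem.Int.floordiv x x) 2) := by
      rw [pvIsqrt, if_neg (by omega), hfx]
    have hsle : (Nat.sqrt x.toNat : Int) ≤ x := by
      have := Nat.sqrt_le_self x.toNat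
      omega
    have hres : pvIsqrt x = (Nat.sqrt x.toNat : Int) := by
      rw [heq]
      exact isqrt_loop_spec _ x x hx1 hsle (by omega)
    rw [hres]
    refine ⟨by positivity, ?_, ?_⟩
    · have h := Nat.sqrt_le' x.toNat
      rw [pow_two] at h
      have h' : ((Nat.sqrt x.toNat * Nat.sqrt x.toNat : Nat) : Int) ≤ (x.toNat : Int) := by exact_mod_cast h
      push_cast at h'
      omega
    · have h := Nat.lt_succ_sqrt' x.toNat
      rw [Nat.succ_eq_add_one, pow_two] at h
      have h' : ((x.toNat : Nat) : Int) < (((Nat.sqrt x.toNat + 1) * (Nat.sqrt x.toNat + 1) : Nat) : Int) := by exact_mod_cast h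
      push_cast at h'
      omega

-- ===== VERDICT (by name: the statement is the Claim_ definition above) =====
set_option maxHeartbeats 1000000 in
theorem fibonachicken_spec : Claim_equal_fibonachicken := by
  intro n _ hpre
  unfold Pre_fibonachicken at hpre
  unfold Spec_fibonachicken fibonachicken fibonachicken_alt
  rw [if_neg (by omega), if_neg (by omega)]
  show pvDescend (make_fibonacci_set n) ((make_fibonacci_set n).length - 1) n 0
      = PySem.Int.floordiv (pvIsqrt (5 * (n + 1) * (n + 1)) - (n + 1)) 2
  obtain ⟨ℓ, hc, hle, hstop⟩ := main_chain (n.toNat + 1) 0 n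
  simp only [Nat.zero_add] at hc hle hstop
  have hstop' : n < (pvP ℓ).1 + (pvP ℓ).2 := by
    apply hstop
    show (n - 1).toNat < n.toNat + 1
    omega
  have hL : make_fibonacci_set n = [(0,0),(1,1)] ++ pvChain (n.toNat + 1) n 1 1 := by
    unfold make_fibonacci_set; exact mk_chain _ n 1 1 _
  have h11 : pvChain (n.toNat + 1) n 1 1 = (List.range ℓ).map (fun i => pvP (1 + i)) := hc
  have hfuel : ℓ < n.toNat + 2 := by
    cases ℓ with
    | zero => omega
    | succ ℓ' =>
      have h1 := hle ℓ' (by omega)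
      have h2 := pvP_ge (1 + ℓ')
      omega
  have hdesc : pvDescend (make_fibonacci_set n) ((make_fibonacci_set n).length - 1) n 0
      = pvDown (n.toNat + 2) n (pvP ℓ).1 (pvP ℓ).2 0 := by
    rw [hL, h11]
    have hlen : ([((0:Int),(0:Int)),(1,1)] ++ (List.range ℓ).map (fun i => pvP (1 + i))).length - 1
        = ℓ + 1 := by simp
    rw [hlen]
    apply descend_eq _ _ _ _ _ _ hpre hstop' hfuel
    intro i hi
    cases i with
    | zero => rfl
    | succ t =>
      have ht : t < ℓ := by omega
      show (((0:Int),(0:Int)) :: ((1,1) :: (List.range ℓ).map (fun i => pvP (1 + i)))).getD (t + 2) (0,0) = pvP (t+1)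
      simp only [List.getD_cons_succ]
      rw [List.getD_eq_getElem?_getD]
      simp [ht]
      congr 1
      omega
  obtain ⟨r, heq, hr0, hB1, hB2⟩ := down_bounds ℓ (n.toNat + 2) n 0 hpre hstop' hfuel
  have hx : (0:Int) ≤ 5 * (n + 1) * (n + 1) := by positivity
  obtain ⟨hs0, hs1, hs2⟩ := pvIsqrt_spec (5 * (n + 1) * (n + 1)) hx
  have hTs : 2*r + n + 1 ≤ pvIsqrt (5 * (n + 1) * (n + 1)) := by
    by_contra hcon
    have h1 : pvIsqrt (5 * (n + 1) * (n + 1)) + 1 ≤ 2*r + n + 1 := by omega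
    have h2 : (pvIsqrt (5 * (n + 1) * (n + 1)) + 1) * (pvIsqrt (5 * (n + 1) * (n + 1)) + 1)
        ≤ (2*r + n + 1) * (2*r + n + 1) := mul_le_mul h1 h1 (by omega) (by omega)
    nlinarith [hB1, hs2, h2]
  have hsT : pvIsqrt (5 * (n + 1) * (n + 1)) ≤ 2*r + n + 2 := by
    by_contra hcon
    have h1 : 2*r + n + 3 ≤ pvIsqrt (5 * (n + 1) * (n + 1)) := by omega
    have h2 : (2*r + n + 3) * (2*r + n + 3)
        ≤ pvIsqrt (5 * (n + 1) * (n + 1)) * pvIsqrt (5 * (n + 1) * (n + 1)) :=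
      mul_le_mul h1 h1 (by omega) hs0
    nlinarith [hB2, hs1, h2]
  have hfd : PySem.Int.floordiv (pvIsqrt (5 * (n + 1) * (n + 1)) - (n + 1)) 2 = r := by
    rw [PySem.Int.floordiv_eq_iff_of_pos (by omega)]
    omega
  rw [hdesc, heq, hfd]
  omega
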